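-- pv_equiv track=rewrite | github.com/NeurosnapInc/neurosnap | src/neurosnap/algos/ipsae.py | contiguous_ranges
-- ===== SOURCE A (Python) =====
-- def contiguous_ranges(numbers: set[int]) -> str:
--   if not numbers:
--     return ""
--   s = sorted(numbers)
--   out = []
--   a = b = s[0]
--   for x in s[1:]:
--     if x == b + 1:
--       b = x
--     else:
--       out.append(f"{a}" if a == b else f"{a}-{b}")
--       a = b = x
--   out.append(f"{a}" if a == b else f"{a}-{b}")
--   return "+".join(out)
-- ===== SOURCE B (Python) =====
-- from itertools import groupby
--
-- def contiguous_ranges(numbers: set[int]) -> str: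
--   pieces = []
--   for _, grp in groupby(enumerate(sorted(numbers)), key=lambda iv: iv[1] - iv[0]):
--     vals = [v for _, v in grp]
--     a, b = vals[0], vals[-1]
--     pieces.append(f"{a}" if a == b else f"{a}-{b}")
--   return "+".join(pieces)
-- ===== Notes on version B (the rewrite author's own statement) =====
-- stated objective: idiomatic
-- what changed: Replaces the explicit run-tracking loop with (a,b,out) accumulator state by the classic itertools.groupby idiom keyed on value-index over the enumerated sorted list, with the empty case falling out naturally instead of an early return.
import Mathlib
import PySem

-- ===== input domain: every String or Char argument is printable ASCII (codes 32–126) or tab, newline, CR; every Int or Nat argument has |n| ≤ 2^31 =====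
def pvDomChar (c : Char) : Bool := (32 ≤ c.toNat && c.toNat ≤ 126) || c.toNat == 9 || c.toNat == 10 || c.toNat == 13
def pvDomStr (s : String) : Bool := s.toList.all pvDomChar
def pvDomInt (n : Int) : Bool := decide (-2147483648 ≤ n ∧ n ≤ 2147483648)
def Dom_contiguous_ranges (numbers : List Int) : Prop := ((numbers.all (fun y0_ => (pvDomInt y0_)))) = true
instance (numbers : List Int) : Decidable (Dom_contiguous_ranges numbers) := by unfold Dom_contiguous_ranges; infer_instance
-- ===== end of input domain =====

-- B replaces A's explicit run-tracking loop (state a, b, out) by the idiomatic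
-- groupby-on-(value - index) decomposition over the enumerated sorted list (objective: idiomatic).

-- ===== PORT A =====
-- the loop body of A's for-loop, as a fold step over the state (a, b, out)
def pvStepA (st : Int × Int × List String) (x : Int) : Int × Int × List String :=
  if x = st.2.1 + 1 then (st.1, x, st.2.2)
  else (x, x, st.2.2 ++ [if st.1 = st.2.1 then PySem.Int.toStr st.1
                         else PySem.Int.toStr st.1 ++ "-" ++ PySem.Int.toStr st.2.1])

def contiguous_ranges (numbers : List Int) : String :=
  if numbers = [] then ""
  else
    match PySem.List.sorted numbers (fun x => x) with
    | [] => ""   -- unreachable: sorted keeps the length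
    | h :: t =>
      let st := t.foldl pvStepA (h, h, ([] : List String))
      PySem.Str.join "+" (st.2.2 ++ [if st.1 = st.2.1 then PySem.Int.toStr st.1
                                     else PySem.Int.toStr st.1 ++ "-" ++ PySem.Int.toStr st.2.1])

-- ===== PORT B =====
-- itertools.groupby on (index, value) pairs keyed by value - index:
-- pvRun k l = (values of the maximal prefix of l whose key is k, the rest of l)
def pvRun (k : Int) : List (Int × Int) → List Int × List (Int × Int)
  | [] => ([], [])
  | (i, v) :: rest =>
    if v - i = k then
      let p := pvRun k rest
      (v :: p.1, p.2)
    else ([], (i, v) :: rest)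

theorem pvRun_snd_length (k : Int) (l : List (Int × Int)) : (pvRun k l).2.length ≤ l.length := by
  induction l with
  | nil => simp [pvRun]
  | cons p rest ih =>
    obtain ⟨i, v⟩ := p
    simp only [pvRun]
    split
    · exact Nat.le_succ_of_le ih
    · simp

-- the groups of itertools.groupby(·, key = value - index), values only
def pvGroups : List (Int × Int) → List (List Int)
  | [] => []
  | (i, v) :: rest =>
    let p := pvRun (v - i) rest
    (v :: p.1) :: pvGroups p.2
termination_by l => l.length
decreasing_by exact Nat.lt_succ_of_le (pvRun_snd_length _ _)

-- per-group formatting: a = vals[0], b = vals[-1]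
def pvFmtG (vals : List Int) : String :=
  match vals with
  | [] => ""   -- unreachable: groupby groups are nonempty
  | a :: t =>
    let b := (a :: t).getLast (by simp)
    if a = b then PySem.Int.toStr a else PySem.Int.toStr a ++ "-" ++ PySem.Int.toStr b

def contiguous_ranges_alt (numbers : List Int) : String :=
  PySem.Str.join "+"
    ((pvGroups (PySem.List.enumerate (PySem.List.sorted numbers (fun x => x)))).map pvFmtG)

-- ===== PRECONDITION & SPEC =====
def Spec_contiguous_ranges (numbers : List Int) (out : String) : Prop := out = contiguous_ranges_alt numbers
instance (numbers : List Int) (out : String) : Decidable (Spec_contiguous_ranges numbers out) := by unfold Spec_contiguous_ranges; infer_instance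

-- ===== CLAIM (what is proved, stated in full; the proofs are below) =====
def Claim_equal_contiguous_ranges : Prop := ∀ (numbers : List Int), Dom_contiguous_ranges numbers → Spec_contiguous_ranges numbers (contiguous_ranges numbers)

-- ===== LEMMAS AND PROOFS =====

-- "{a}" if a == b else "{a}-{b}"
def pvFmt (a b : Int) : String :=
  if a = b then PySem.Int.toStr a else PySem.Int.toStr a ++ "-" ++ PySem.Int.toStr b

theorem pvFmt_def (a b : Int) :
    (if a = b then PySem.Int.toStr a else PySem.Int.toStr a ++ "-" ++ PySem.Int.toStr b) = pvFmt a b := rfl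

-- recursive reading of A's loop: the list of strings emitted from state (a, b)
def pvLoop (a b : Int) : List Int → List String
  | [] => [pvFmt a b]
  | x :: xs => if x = b + 1 then pvLoop a x xs else pvFmt a b :: pvLoop x x xs

theorem pvLoop_cons_pos (a b x : Int) (xs : List Int) (h : x = b + 1) :
    pvLoop a b (x :: xs) = pvLoop a x xs := by simp [pvLoop, h]

theorem pvLoop_cons_neg (a b x : Int) (xs : List Int) (h : ¬ x = b + 1) :
    pvLoop a b (x :: xs) = pvFmt a b :: pvLoop x x xs := by simp [pvLoop, h]

theorem pvRun_cons_pos (k i v : Int) (rest : List (Int × Int)) (h : v - i = k) :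
    pvRun k ((i, v) :: rest) = (v :: (pvRun k rest).1, (pvRun k rest).2) := by
  simp [pvRun, h]

theorem pvRun_cons_neg (k i v : Int) (rest : List (Int × Int)) (h : ¬ v - i = k) :
    pvRun k ((i, v) :: rest) = ([], (i, v) :: rest) := by
  simp [pvRun, h]

theorem pvGroups_cons (i v : Int) (rest : List (Int × Int)) :
    pvGroups ((i, v) :: rest)
      = (v :: (pvRun (v - i) rest).1) :: pvGroups (pvRun (v - i) rest).2 := by
  simp [pvGroups]

theorem pvFmtG_cons (a : Int) (t : List Int) : pvFmtG (a :: t) = pvFmt a (t.getLastD a) := by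
  simp [pvFmtG, pvFmt, List.getLast_eq_getLastD]

theorem foldA (xs : List Int) : ∀ (a b : Int) (out : List String),
    (xs.foldl pvStepA (a, b, out)).2.2 ++
      [pvFmt (xs.foldl pvStepA (a, b, out)).1 (xs.foldl pvStepA (a, b, out)).2.1]
      = out ++ pvLoop a b xs := by
  induction xs with
  | nil => intro a b out; simp [pvLoop]
  | cons x xs ih =>
    intro a b out
    simp only [List.foldl_cons, pvStepA]
    by_cases h : x = b + 1
    · rw [if_pos h, pvLoop_cons_pos a b x xs h]
      exact ih a x out
    · rw [if_neg h, pvLoop_cons_neg a b x xs h, pvFmt_def,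
        ih x x (out ++ [pvFmt a b]), List.append_assoc, List.singleton_append]

-- core correspondence: A's loop from state (a, b) at index n equals B's current
-- groupby run (key b + 1 - n) followed by the remaining groups
theorem runLemma (xs : List Int) : ∀ (n a b : Int),
    pvLoop a b xs =
      pvFmt a ((pvRun (b + 1 - n) (PySem.List.enumerate xs n)).1.getLastD b)
        :: (pvGroups (pvRun (b + 1 - n) (PySem.List.enumerate xs n)).2).map pvFmtG := by
  induction xs with
  | nil => intro n a b; simp [pvLoop, pvRun, pvGroups, PySem.List.enumerate_nil]
  | cons x xs ih =>
    intro n a b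
    rw [PySem.List.enumerate_cons]
    by_cases h : x = b + 1
    · rw [pvLoop_cons_pos a b x xs h,
        pvRun_cons_pos (b + 1 - n) n x (PySem.List.enumerate xs (n + 1)) (by omega)]
      have hk : b + 1 - n = x + 1 - (n + 1) := by omega
      rw [hk, ih (n + 1) a x, List.getLastD_cons]
    · rw [pvLoop_cons_neg a b x xs h,
        pvRun_cons_neg (b + 1 - n) n x (PySem.List.enumerate xs (n + 1)) (by omega),
        pvGroups_cons, List.map_cons, pvFmtG_cons]
      have hk : x - n = x + 1 - (n + 1) := by omega
      rw [hk, ih (n + 1) x x]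
      simp

theorem main_eq (numbers : List Int) :
    contiguous_ranges numbers = contiguous_ranges_alt numbers := by
  unfold contiguous_ranges contiguous_ranges_alt
  by_cases hnil : numbers = []
  · subst hnil
    simp [PySem.List.sorted, pvGroups, PySem.List.enumerate_nil, PySem.Str.join]
  · rw [if_neg hnil]
    have hlen : (PySem.List.sorted numbers (fun x => x)).length = numbers.length :=
      PySem.List.length_sorted numbers _ false
    cases hs : PySem.List.sorted numbers (fun x => x) with
    | nil =>
      exfalso
      rw [hs] at hlen
      exact hnil (List.eq_nil_of_length_eq_zero hlen.symm)
    | cons h t =>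
      simp only [pvFmt_def]
      rw [foldA t h h [], List.nil_append]
      rw [PySem.List.enumerate_cons, pvGroups_cons, List.map_cons, pvFmtG_cons]
      rw [runLemma t 1 h h]
      norm_num

-- ===== VERDICT (by name: the statement is the Claim_ definition above) =====
theorem contiguous_ranges_spec : Claim_equal_contiguous_ranges := by
  intro numbers _
  exact main_eq numbers
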